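-- pv_equiv track=rewrite | github.com/mike-2006/2stage | main.py | _compute_layers
-- ===== SOURCE A (Python) =====
-- def _compute_layers(adj, roots):
--     from collections import deque, defaultdict
--     layer = {}
--     q = deque()
--     for r in roots:
--         layer[r] = 0
--         q.append(r)
--     while q:
--         u = q.popleft()
--         for v in adj.get(u, []):
--             if v not in layer:
--                 layer[v] = layer[u] + 1
--                 q.append(v)
--     for u in adj.keys():
--         if u not in layer:
--             layer[u] = 0
--     return layer
-- ===== SOURCE B (Python) =====
-- def _compute_layers(adj, roots):
--     seen = set()
--     order = []               # (node, layer) pairs in discovery order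
--     frontier = list(roots)
--     for r in roots:
--         if r not in seen:
--             seen.add(r)
--             order.append((r, 0))
--     level = 0
--     while frontier:
--         level += 1
--         nxt = []
--         for u in frontier:
--             for v in adj.get(u, []):
--                 if v not in seen:
--                     seen.add(v)
--                     order.append((v, level))
--                     nxt.append(v)
--         frontier = nxt
--     for u in adj:
--         if u not in seen:
--             order.append((u, 0))
--     return dict(order)
-- ===== Notes on version B (the rewrite author's own statement) =====
-- stated objective: alternative
-- what changed: Replaces A's dict-plus-deque BFS (pop one node at a time, label it layer[u]+1, write straight into the result dict) by a level-synchronized BFS over different data structures: a seen-SET plus an ordered list of (node, layer) pairs, processing whole frontiers with an explicit level counter and materialising the result dict only once at the end via dict(order).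
import Mathlib
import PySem

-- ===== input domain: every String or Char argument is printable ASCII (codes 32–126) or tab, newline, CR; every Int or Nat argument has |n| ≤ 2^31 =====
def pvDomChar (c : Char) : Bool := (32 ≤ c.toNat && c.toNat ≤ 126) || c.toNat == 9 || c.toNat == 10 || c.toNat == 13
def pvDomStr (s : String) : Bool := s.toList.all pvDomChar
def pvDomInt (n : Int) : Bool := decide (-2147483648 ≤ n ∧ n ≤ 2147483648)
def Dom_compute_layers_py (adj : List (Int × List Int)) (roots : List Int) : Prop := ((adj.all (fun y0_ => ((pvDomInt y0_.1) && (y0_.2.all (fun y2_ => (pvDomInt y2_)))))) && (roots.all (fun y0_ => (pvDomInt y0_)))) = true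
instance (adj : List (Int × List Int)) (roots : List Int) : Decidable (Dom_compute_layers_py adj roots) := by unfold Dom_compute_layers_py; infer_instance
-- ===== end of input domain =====

-- B replaces A's dict-plus-deque BFS by a level-synchronized BFS over a seen-SET and an ordered
-- (node, layer) pair LIST, materialising the dict only once at the end; same labels, same order.

-- ===== PORT A =====
-- "for v in adj.get(u, []): if v not in layer: layer[v] = lbl; q.append(v)"
def pvVisit (lbl : Int) (st : PySem.Dict Int Int × List Int) (v : Int) : PySem.Dict Int Int × List Int :=
  if st.1.contains v then st else (st.1.insert v lbl, st.2 ++ [v])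

def pvStep (adjd : PySem.Dict Int (List Int)) (lbl : Int) (st : PySem.Dict Int Int × List Int) (u : Int) : PySem.Dict Int Int × List Int :=
  (adjd.getD u []).foldl (pvVisit lbl) st

-- all vertices that can ever be newly discovered (used only as a termination measure)
def pvUniv (adjd : PySem.Dict Int (List Int)) : List Int :=
  PySem.List.dedup (adjd.items.flatMap (fun p => p.2))

def pvPending (U : List Int) (d : PySem.Dict Int Int) : Nat :=
  (U.filter (fun v => !(d.contains v))).length

lemma pvPending_insert (U : List Int) (d : PySem.Dict Int Int) (v lbl : Int)
    (hU : U.Nodup) (hv : v ∈ U) (hc : d.contains v = false) :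
    pvPending U d = pvPending U (d.insert v lbl) + 1 := by
  induction U with
  | nil => cases hv
  | cons a U ih =>
    rcases List.nodup_cons.mp hU with ⟨hna, hnU⟩
    rcases List.mem_cons.mp hv with rfl | hv
    · unfold pvPending
      simp only [List.filter_cons, hc, PySem.Dict.contains_insert_self]
      have : U.filter (fun k => !((d.insert v lbl).contains k)) = U.filter (fun k => !(d.contains k)) := by
        apply List.filter_congr
        intro k hk
        have hkv : k ≠ v := fun h => hna (h ▸ hk)
        simp [PySem.Dict.contains_insert, hkv]
      simp [this]
    · have hav : a ≠ v := fun h => hna (h ▸ hv)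
      have step : ((d.insert v lbl).contains a) = d.contains a := by
        simp [PySem.Dict.contains_insert, hav]
      unfold pvPending
      simp only [List.filter_cons, step]
      have := ih hnU hv
      unfold pvPending at this
      cases h : (!(d.contains a)) <;> simp [this]

lemma pvVisit_split (lbl : Int) :
    ∀ (vs : List Int) (d : PySem.Dict Int Int) (acc : List Int),
      vs.foldl (pvVisit lbl) (d, acc)
        = ((vs.foldl (pvVisit lbl) (d, [])).1, acc ++ (vs.foldl (pvVisit lbl) (d, [])).2) := by
  intro vs
  induction vs with
  | nil => intro d acc; simp
  | cons v vs ih =>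
    intro d acc
    by_cases h : d.contains v
    · simp only [List.foldl_cons, pvVisit]
      rw [if_pos h, if_pos h]
      exact ih d acc
    · simp only [List.foldl_cons]
      rw [show pvVisit lbl (d, acc) v = (d.insert v lbl, acc ++ [v]) from by simp [pvVisit, h],
          show pvVisit lbl (d, []) v = (d.insert v lbl, [v]) from by simp [pvVisit, h]]
      rw [ih (d.insert v lbl) (acc ++ [v]), ih (d.insert v lbl) [v]]
      simp

lemma mem_univ_of_mem_getD (adjd : PySem.Dict Int (List Int)) (u v : Int)
    (hv : v ∈ adjd.getD u []) : v ∈ pvUniv adjd := by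
  unfold pvUniv
  rw [PySem.List.mem_dedup]
  rcases h : adjd.get? u with _ | l
  · rw [PySem.Dict.getD_eq_get?_getD, h] at hv; cases hv
  · rw [PySem.Dict.getD_eq_get?_getD, h] at hv
    have : (u, l) ∈ adjd.items := PySem.Dict.mem_items_of_get?_eq_some adjd h
    exact List.mem_flatMap.mpr ⟨(u, l), this, hv⟩

lemma pvVisit_pending (U : List Int) (lbl : Int) (hU : U.Nodup) :
    ∀ (vs : List Int) (d : PySem.Dict Int Int), (∀ v ∈ vs, v ∈ U) →
      pvPending U d = pvPending U ((vs.foldl (pvVisit lbl) (d, [])).1)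
        + ((vs.foldl (pvVisit lbl) (d, [])).2).length := by
  intro vs
  induction vs with
  | nil => intro d _; simp
  | cons v vs ih =>
    intro d hsub
    by_cases h : d.contains v
    · simp only [List.foldl_cons, pvVisit]
      rw [if_pos h]
      exact ih d (fun w hw => hsub w (List.mem_cons_of_mem _ hw))
    · simp only [List.foldl_cons, pvVisit]
      rw [if_neg h]
      simp only [List.nil_append]
      rw [pvVisit_split lbl vs (d.insert v lbl) [v]]
      have h1 : pvPending U d = pvPending U (d.insert v lbl) + 1 :=
        pvPending_insert U d v lbl hU (hsub v List.mem_cons_self) (by simpa using h)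
      have h2 := ih (d.insert v lbl) (fun w hw => hsub w (List.mem_cons_of_mem _ hw))
      simp only [List.length_append, List.length_cons, List.length_nil]
      omega

-- the deque loop: pop u, push its fresh neighbours labelled layer[u]+1
def pvLoopA (adjd : PySem.Dict Int (List Int)) (layer : PySem.Dict Int Int) (q : List Int) : PySem.Dict Int Int :=
  match q with
  | [] => layer
  | u :: rest =>
    let r := pvStep adjd (layer.getD u 0 + 1) (layer, []) u
    pvLoopA adjd r.1 (rest ++ r.2)
termination_by q.length + 2 * pvPending (pvUniv adjd) layer
decreasing_by
  have h := pvVisit_pending (pvUniv adjd) (layer.getD u 0 + 1) (PySem.List.nodup_dedup _)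
      (adjd.getD u []) layer (fun v hv => mem_univ_of_mem_getD adjd u v hv)
  simp only [pvStep] at *
  simp only [List.length_append, List.length_cons]
  omega

def compute_layers_py (adj : List (Int × List Int)) (roots : List Int) : List (Int × Int) :=
  let adjd := PySem.Dict.mk adj
  let init := roots.foldl (fun st r => (st.1.insert r 0, st.2 ++ [r])) ((PySem.Dict.empty : PySem.Dict Int Int), ([] : List Int))
  let layer := pvLoopA adjd init.1 init.2
  let layer2 := adjd.keys.foldl (fun d u => if d.contains u then d else d.insert u 0) layer
  layer2.items

-- ===== PORT B =====
-- "if v not in seen: seen.add(v); order.append((v, level)); nxt.append(v)"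
def bVisit (level : Int) (st : PySem.Set Int × List (Int × Int) × List Int) (v : Int) : PySem.Set Int × List (Int × Int) × List Int :=
  if st.1.contains v then st else (st.1.add v, st.2.1 ++ [(v, level)], st.2.2 ++ [v])

def bStep (adjd : PySem.Dict Int (List Int)) (level : Int) (st : PySem.Set Int × List (Int × Int) × List Int) (u : Int) : PySem.Set Int × List (Int × Int) × List Int :=
  (adjd.getD u []).foldl (bVisit level) st

def bPending (U : List Int) (s : PySem.Set Int) : Nat :=
  (U.filter (fun v => !(PySem.Set.contains s v))).length

lemma set_not_mem_of_contains_false {s : PySem.Set Int} {v : Int}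
    (hc : PySem.Set.contains s v = false) : v ∉ s := by
  simpa [PySem.Set.contains] using hc

lemma bPending_add (U : List Int) (s : PySem.Set Int) (v : Int)
    (hU : U.Nodup) (hv : v ∈ U) (hc : PySem.Set.contains s v = false) :
    bPending U s = bPending U (s.add v) + 1 := by
  have hadd : s.add v = s ++ [v] := by simp [PySem.Set.add, set_not_mem_of_contains_false hc]
  have hvs : v ∉ s := set_not_mem_of_contains_false hc
  have hfun : ∀ t : List Int, (fun k => !PySem.Set.contains t k) = (fun k : Int => decide (k ∉ t)) := by
    intro t; funext k; simp [PySem.Set.contains]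
  rw [hadd]
  unfold bPending
  rw [hfun s, hfun (s ++ [v])]
  induction U with
  | nil => cases hv
  | cons a U ih =>
    rcases List.nodup_cons.mp hU with ⟨hna, hnU⟩
    rcases List.mem_cons.mp hv with rfl | hv
    · have hf : List.filter (fun k => !decide (k ∈ s) && !decide (k = v)) U
          = List.filter (fun k => !decide (k ∈ s)) U := by
        apply List.filter_congr
        intro k hk
        have hkv : k ≠ v := fun h => hna (h ▸ hk)
        simp [hkv]
      simp [hvs]
      rw [hf]
    · have hav : a ≠ v := fun h => hna (h ▸ hv)
      have hstep : (decide (a ∉ s ++ [v])) = (decide (a ∉ s)) := by simp [hav]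
      simp only [List.filter_cons, hstep]
      have := ih hnU hv
      cases h : (decide (a ∉ s)) <;> simp at this ⊢ <;> omega

lemma bVisit_split (level : Int) :
    ∀ (vs : List Int) (s : PySem.Set Int) (o : List (Int × Int)) (acc : List Int),
      vs.foldl (bVisit level) (s, o, acc)
        = ((vs.foldl (bVisit level) (s, o, [])).1,
           (vs.foldl (bVisit level) (s, o, [])).2.1,
           acc ++ (vs.foldl (bVisit level) (s, o, [])).2.2) := by
  intro vs
  induction vs with
  | nil => intro s o acc; simp
  | cons v vs ih =>
    intro s o acc
    by_cases h : PySem.Set.contains s v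
    · simp only [List.foldl_cons, bVisit]
      rw [if_pos h, if_pos h]
      exact ih s o acc
    · simp only [List.foldl_cons]
      have hm : v ∉ s := set_not_mem_of_contains_false (by simpa using h)
      rw [show bVisit level (s, o, acc) v = (s.add v, o ++ [(v, level)], acc ++ [v]) from by simp [bVisit, hm],
          show bVisit level (s, o, []) v = (s.add v, o ++ [(v, level)], [v]) from by simp [bVisit, hm]]
      rw [ih (s.add v) (o ++ [(v, level)]) (acc ++ [v]), ih (s.add v) (o ++ [(v, level)]) [v]]
      simp

lemma bVisit_pending (U : List Int) (level : Int) (hU : U.Nodup) :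
    ∀ (vs : List Int) (s : PySem.Set Int) (o : List (Int × Int)), (∀ v ∈ vs, v ∈ U) →
      bPending U s = bPending U ((vs.foldl (bVisit level) (s, o, [])).1)
        + ((vs.foldl (bVisit level) (s, o, [])).2.2).length := by
  intro vs
  induction vs with
  | nil => intro s o _; simp
  | cons v vs ih =>
    intro s o hsub
    by_cases h : PySem.Set.contains s v
    · simp only [List.foldl_cons, bVisit]
      rw [if_pos h]
      exact ih s o (fun w hw => hsub w (List.mem_cons_of_mem _ hw))
    · simp only [List.foldl_cons, bVisit]
      rw [if_neg h]
      simp only [List.nil_append]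
      rw [bVisit_split level vs (s.add v) (o ++ [(v, level)]) [v]]
      have h1 : bPending U s = bPending U (s.add v) + 1 :=
        bPending_add U s v hU (hsub v List.mem_cons_self) (by simpa using h)
      have h2 := ih (s.add v) (o ++ [(v, level)]) (fun w hw => hsub w (List.mem_cons_of_mem _ hw))
      simp only [List.length_append, List.length_cons, List.length_nil]
      omega

lemma bStepF_split (adjd : PySem.Dict Int (List Int)) (level : Int) :
    ∀ (f : List Int) (s : PySem.Set Int) (o : List (Int × Int)) (acc : List Int),
      f.foldl (bStep adjd level) (s, o, acc)
        = ((f.foldl (bStep adjd level) (s, o, [])).1,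
           (f.foldl (bStep adjd level) (s, o, [])).2.1,
           acc ++ (f.foldl (bStep adjd level) (s, o, [])).2.2) := by
  intro f
  induction f with
  | nil => intro s o acc; simp
  | cons u f ih =>
    intro s o acc
    simp only [List.foldl_cons]
    have hstep : ∀ a, bStep adjd level (s, o, a) u
        = ((bStep adjd level (s, o, []) u).1, (bStep adjd level (s, o, []) u).2.1,
           a ++ (bStep adjd level (s, o, []) u).2.2) := by
      intro a; unfold bStep; exact bVisit_split level _ s o a
    rw [hstep acc]
    rcases hX : bStep adjd level (s, o, []) u with ⟨S1, O1, N1⟩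
    rw [ih S1 O1 (acc ++ N1), ih S1 O1 N1]
    simp

lemma bStepF_pending (adjd : PySem.Dict Int (List Int)) (level : Int) :
    ∀ (f : List Int) (s : PySem.Set Int) (o : List (Int × Int)),
      bPending (pvUniv adjd) s
        = bPending (pvUniv adjd) ((f.foldl (bStep adjd level) (s, o, [])).1)
          + ((f.foldl (bStep adjd level) (s, o, [])).2.2).length := by
  intro f
  induction f with
  | nil => intro s o; simp
  | cons u f ih =>
    intro s o
    simp only [List.foldl_cons]
    rcases hX : bStep adjd level (s, o, []) u with ⟨S1, O1, N1⟩
    have h1 : bPending (pvUniv adjd) s = bPending (pvUniv adjd) S1 + N1.length := by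
      have := bVisit_pending (pvUniv adjd) level (PySem.List.nodup_dedup _)
        (adjd.getD u []) s o (fun v hv => mem_univ_of_mem_getD adjd u v hv)
      unfold bStep at hX
      rw [hX] at this
      exact this
    rw [bStepF_split adjd level f S1 O1 N1]
    have h2 := ih S1 O1
    simp only [List.length_append]
    omega

-- "while frontier: level += 1; scan the whole frontier, collecting nxt; frontier = nxt"
def bLoop (adjd : PySem.Dict Int (List Int)) (seen : PySem.Set Int) (order : List (Int × Int)) (frontier : List Int) (level : Int) : PySem.Set Int × List (Int × Int) :=
  if frontier.isEmpty then (seen, order)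
  else
    let r := frontier.foldl (bStep adjd (level + 1)) (seen, order, [])
    bLoop adjd r.1 r.2.1 r.2.2 (level + 1)
termination_by frontier.length + 2 * bPending (pvUniv adjd) seen
decreasing_by
  have h := bStepF_pending adjd (level + 1) frontier seen order
  have hne : frontier.length ≠ 0 := by
    intro h0
    rw [List.length_eq_zero_iff] at h0
    simp [h0] at *
  simp only [List.foldl_attach]
  omega

def compute_layers_py_alt (adj : List (Int × List Int)) (roots : List Int) : List (Int × Int) :=
  let adjd := PySem.Dict.mk adj
  let init := roots.foldl (fun st r => if PySem.Set.contains st.1 r then st else (st.1.add r, st.2 ++ [(r, 0)])) ((PySem.Set.empty : PySem.Set Int), ([] : List (Int × Int)))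
  let res := bLoop adjd init.1 init.2 roots 0
  let fin := adjd.keys.foldl (fun st u => if PySem.Set.contains st.1 u then st else (st.1.add u, st.2 ++ [(u, 0)])) res
  (PySem.Dict.ofList fin.2).items

-- ===== PRECONDITION & SPEC =====
def Spec_compute_layers_py (adj : List (Int × List Int)) (roots : List Int) (out : List (Int × Int)) : Prop := out = compute_layers_py_alt adj roots
instance (adj : List (Int × List Int)) (roots : List Int) (out : List (Int × Int)) : Decidable (Spec_compute_layers_py adj roots out) := by unfold Spec_compute_layers_py; infer_instance

-- ===== CLAIM =====
def Claim_equal_compute_layers_py : Prop := ∀ (adj : List (Int × List Int)) (roots : List Int), Dom_compute_layers_py adj roots → Spec_compute_layers_py adj roots (compute_layers_py adj roots)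

-- ===== LEMMAS AND PROOFS =====

-- the simulation relation between A's (dict, new-queue) state and B's (seen, order, nxt) state
def pvR (st : PySem.Dict Int Int × List Int) (tb : PySem.Set Int × List (Int × Int) × List Int) : Prop :=
  st.1.items = tb.2.1 ∧ tb.1 = tb.2.1.map Prod.fst ∧ tb.1.Nodup ∧ st.2 = tb.2.2

lemma dict_set_contains (d : PySem.Dict Int Int) (v : Int) :
    d.contains v = PySem.Set.contains (d.items.map Prod.fst) v := by
  rw [Bool.eq_iff_iff]
  simp [PySem.Dict.contains, PySem.Set.contains, List.any_eq_true, beq_iff_eq, List.mem_map]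

lemma visit_corr (lbl : Int) (st : PySem.Dict Int Int × List Int)
    (tb : PySem.Set Int × List (Int × Int) × List Int) (v : Int)
    (h : pvR st tb) : pvR (pvVisit lbl st v) (bVisit lbl tb v) := by
  obtain ⟨h1, h2, h3, h4⟩ := h
  have hc : st.1.contains v = PySem.Set.contains tb.1 v := by
    rw [dict_set_contains, h1, h2]
  by_cases h : PySem.Set.contains tb.1 v
  · simp only [pvVisit, bVisit, hc, h, if_pos]
    exact ⟨h1, h2, h3, h4⟩
  · have hcf : st.1.contains v = false := by rw [hc]; simpa using h
    have hsf : PySem.Set.contains tb.1 v = false := by simpa using h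
    simp only [pvVisit, bVisit, hc, hsf, Bool.false_eq_true, if_false]
    have hm : v ∉ List.map Prod.fst tb.2.1 := h2 ▸ set_not_mem_of_contains_false hsf
    refine ⟨?_, ?_, ?_, ?_⟩
    · rw [PySem.Dict.items_insert_of_not_contains _ _ hcf, h1]
    · simp [PySem.Set.add, h2, hm]
    · exact PySem.Set.nodup_add tb.1 v h3
    · rw [h4]

lemma foldl_rel {α β γ : Type} (R : α → β → Prop) (fa : α → γ → α) (fb : β → γ → β)
    (h : ∀ a b x, R a b → R (fa a x) (fb b x)) :
    ∀ (l : List γ) (a : α) (b : β), R a b → R (l.foldl fa a) (l.foldl fb b) := by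
  intro l
  induction l with
  | nil => intro a b hab; exact hab
  | cons x l ih =>
    intro a b hab
    simp only [List.foldl_cons]
    exact ih _ _ (h a b x hab)

lemma step_corr (adjd : PySem.Dict Int (List Int)) (lbl : Int)
    (st : PySem.Dict Int Int × List Int) (tb : PySem.Set Int × List (Int × Int) × List Int) (u : Int)
    (h : pvR st tb) : pvR (pvStep adjd lbl st u) (bStep adjd lbl tb u) := by
  unfold pvStep bStep
  exact foldl_rel pvR (pvVisit lbl) (bVisit lbl) (visit_corr lbl) (adjd.getD u []) st tb h

lemma stepF_corr (adjd : PySem.Dict Int (List Int)) (lbl : Int) (f : List Int)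
    (st : PySem.Dict Int Int × List Int) (tb : PySem.Set Int × List (Int × Int) × List Int)
    (h : pvR st tb) : pvR (f.foldl (pvStep adjd lbl) st) (f.foldl (bStep adjd lbl) tb) :=
  foldl_rel pvR (pvStep adjd lbl) (bStep adjd lbl) (step_corr adjd lbl) f st tb h

-- A-side facts (labels of discovered nodes, splitting the A fold) — as in the deque analysis
lemma pvVisit_mono (lbl : Int) :
    ∀ (vs : List Int) (st : PySem.Dict Int Int × List Int) (k x : Int),
      st.1.get? k = some x → ((vs.foldl (pvVisit lbl) st).1).get? k = some x := by
  intro vs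
  induction vs with
  | nil => intro st k x h; exact h
  | cons v vs ih =>
    intro st k x h
    simp only [List.foldl_cons]
    apply ih
    unfold pvVisit
    by_cases hc : st.1.contains v
    · rw [if_pos hc]; exact h
    · rw [if_neg hc]
      have hk : k ≠ v := by
        intro he; subst he
        rw [PySem.Dict.contains_eq_isSome_get?] at hc
        simp [h] at hc
      simp [PySem.Dict.get?_insert, hk, h]

lemma pvVisit_labeled (lbl : Int) :
    ∀ (vs : List Int) (d : PySem.Dict Int Int),
      ∀ v ∈ (vs.foldl (pvVisit lbl) (d, [])).2,
        ((vs.foldl (pvVisit lbl) (d, [])).1).get? v = some lbl := by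
  intro vs
  induction vs with
  | nil => intro d v hv; simp at hv
  | cons w vs ih =>
    intro d v hv
    by_cases h : d.contains w
    · simp only [List.foldl_cons, pvVisit] at hv ⊢
      rw [if_pos h] at hv ⊢
      exact ih d v hv
    · simp only [List.foldl_cons, pvVisit] at hv ⊢
      rw [if_neg h] at hv ⊢
      simp only [List.nil_append] at hv ⊢
      rw [pvVisit_split lbl vs (d.insert w lbl) [w]] at hv ⊢
      simp only [List.cons_append, List.nil_append, List.mem_cons] at hv
      rcases hv with rfl | hv
      · exact pvVisit_mono lbl vs (d.insert v lbl, []) v lbl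
          (PySem.Dict.get?_insert_self _ _ _)
      · exact ih (d.insert w lbl) v hv

lemma pvStepF_split (adjd : PySem.Dict Int (List Int)) (lbl : Int) :
    ∀ (f : List Int) (d : PySem.Dict Int Int) (acc : List Int),
      f.foldl (pvStep adjd lbl) (d, acc)
        = ((f.foldl (pvStep adjd lbl) (d, [])).1, acc ++ (f.foldl (pvStep adjd lbl) (d, [])).2) := by
  intro f
  induction f with
  | nil => intro d acc; simp
  | cons u f ih =>
    intro d acc
    simp only [List.foldl_cons]
    have hstep : ∀ a, pvStep adjd lbl (d, a) u
        = ((pvStep adjd lbl (d, []) u).1, a ++ (pvStep adjd lbl (d, []) u).2) := by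
      intro a; unfold pvStep; exact pvVisit_split lbl _ d a
    rw [hstep acc]
    rcases hX : pvStep adjd lbl (d, []) u with ⟨D1, N1⟩
    rw [ih D1 (acc ++ N1), ih D1 N1]
    simp

lemma pvStepF_pending (adjd : PySem.Dict Int (List Int)) (lbl : Int) :
    ∀ (f : List Int) (d : PySem.Dict Int Int),
      pvPending (pvUniv adjd) d
        = pvPending (pvUniv adjd) ((f.foldl (pvStep adjd lbl) (d, [])).1)
          + ((f.foldl (pvStep adjd lbl) (d, [])).2).length := by
  intro f
  induction f with
  | nil => intro d; simp
  | cons u f ih =>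
    intro d
    simp only [List.foldl_cons]
    rcases hX : pvStep adjd lbl (d, []) u with ⟨D1, N1⟩
    have h1 : pvPending (pvUniv adjd) d = pvPending (pvUniv adjd) D1 + N1.length := by
      have := pvVisit_pending (pvUniv adjd) lbl (PySem.List.nodup_dedup _)
        (adjd.getD u []) d (fun v hv => mem_univ_of_mem_getD adjd u v hv)
      unfold pvStep at hX
      rw [hX] at this
      exact this
    rw [pvStepF_split adjd lbl f D1 N1]
    have h2 := ih D1
    simp only [List.length_append]
    omega

lemma pvStepF_mono (adjd : PySem.Dict Int (List Int)) (lbl : Int) :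
    ∀ (f : List Int) (st : PySem.Dict Int Int × List Int) (k x : Int),
      st.1.get? k = some x → ((f.foldl (pvStep adjd lbl) st).1).get? k = some x := by
  intro f
  induction f with
  | nil => intro st k x h; exact h
  | cons u f ih =>
    intro st k x h
    simp only [List.foldl_cons]
    exact ih _ k x (pvVisit_mono lbl (adjd.getD u []) st k x h)

lemma pvStepF_labeled (adjd : PySem.Dict Int (List Int)) (lbl : Int) :
    ∀ (f : List Int) (d : PySem.Dict Int Int),
      ∀ v ∈ (f.foldl (pvStep adjd lbl) (d, [])).2,
        ((f.foldl (pvStep adjd lbl) (d, [])).1).get? v = some lbl := by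
  intro f
  induction f with
  | nil => intro d v hv; simp at hv
  | cons u f ih =>
    intro d v hv
    simp only [List.foldl_cons] at hv ⊢
    rcases hX : pvStep adjd lbl (d, []) u with ⟨D1, N1⟩
    rw [hX] at hv
    rw [pvStepF_split adjd lbl f D1 N1] at hv ⊢
    simp only [List.mem_append] at hv
    rcases hv with hv | hv
    · have h1 : D1.get? v = some lbl := by
        have := pvVisit_labeled lbl (adjd.getD u []) d
        unfold pvStep at hX
        rw [hX] at this
        exact this v hv
      exact pvStepF_mono adjd lbl f (D1, []) v lbl h1
    · exact ih D1 v hv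

-- "process one whole layer of the deque at once": A's queue discipline per level
lemma pvShiftA (adjd : PySem.Dict Int (List Int)) (L : Int) :
    ∀ (f1 : List Int) (layer : PySem.Dict Int Int) (nf : List Int),
      (∀ u ∈ f1, layer.get? u = some L) →
      pvLoopA adjd layer (f1 ++ nf)
        = pvLoopA adjd ((f1.foldl (pvStep adjd (L + 1)) (layer, [])).1)
            (nf ++ (f1.foldl (pvStep adjd (L + 1)) (layer, [])).2) := by
  intro f1
  induction f1 with
  | nil => intro layer nf _; simp
  | cons u f1 ih =>
    intro layer nf hin
    have hu : layer.get? u = some L := hin u List.mem_cons_self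
    have hgd : layer.getD u 0 = L := PySem.Dict.getD_of_get?_eq_some _ _ hu
    rw [List.cons_append, pvLoopA, hgd]
    rcases hX : pvStep adjd (L + 1) (layer, []) u with ⟨D1, N1⟩
    have hmem : ∀ w ∈ f1, D1.get? w = some L := by
      intro w hw
      have h1 := pvVisit_mono (L + 1) (adjd.getD u []) (layer, []) w L
        (hin w (List.mem_cons_of_mem _ hw))
      unfold pvStep at hX
      rw [hX] at h1
      exact h1
    have hassoc : f1 ++ nf ++ N1 = f1 ++ (nf ++ N1) := List.append_assoc _ _ _
    rw [hassoc, ih D1 (nf ++ N1) hmem]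
    simp only [List.foldl_cons]
    rw [hX, pvStepF_split adjd (L + 1) f1 D1 N1]
    simp [List.append_assoc]

-- main simulation: the deque loop and the level loop build the same labels in the same order
lemma pvMainAB (adjd : PySem.Dict Int (List Int)) :
    ∀ (n : Nat) (layer : PySem.Dict Int Int) (seen : PySem.Set Int) (order : List (Int × Int))
      (f : List Int) (L : Int),
      f.length + 2 * pvPending (pvUniv adjd) layer ≤ n →
      (∀ u ∈ f, layer.get? u = some L) →
      layer.items = order → seen = order.map Prod.fst → seen.Nodup →
      (pvLoopA adjd layer f).items = (bLoop adjd seen order f L).2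
        ∧ (bLoop adjd seen order f L).1 = (bLoop adjd seen order f L).2.map Prod.fst
        ∧ (bLoop adjd seen order f L).1.Nodup := by
  intro n
  induction n with
  | zero =>
    intro layer seen order f L hle hin h1 h2 h3
    have : f = [] := by
      cases f with
      | nil => rfl
      | cons a l => simp at hle
    subst this
    rw [pvLoopA, bLoop]
    simp [h1, h2]
    exact h2 ▸ h3
  | succ n ih =>
    intro layer seen order f L hle hin h1 h2 h3
    cases f with
    | nil =>
      rw [pvLoopA, bLoop]
      simp [h1, h2]
      exact h2 ▸ h3
    | cons u fr =>
      have hA := pvShiftA adjd L (u :: fr) layer [] hin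
      simp only [List.append_nil, List.nil_append] at hA
      rw [hA, bLoop]
      simp only [List.isEmpty_cons, Bool.false_eq_true, if_false]
      have hR := stepF_corr adjd (L + 1) (u :: fr) (layer, []) (seen, order, [])
        ⟨h1, h2, h3, rfl⟩
      rcases hX : (u :: fr).foldl (pvStep adjd (L + 1)) (layer, []) with ⟨D1, N1⟩
      rcases hY : (u :: fr).foldl (bStep adjd (L + 1)) (seen, order, []) with ⟨S1, O1, M1⟩
      rw [hX, hY] at hR
      obtain ⟨r1, r2, r3, r4⟩ := hR
      have hpend := pvStepF_pending adjd (L + 1) (u :: fr) layer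
      rw [hX] at hpend
      simp only at hpend r1 r2 r3 r4
      subst r4
      apply ih D1 S1 O1 N1 (L + 1)
      · simp only [List.length_cons] at hle
        omega
      · intro v hv
        have := pvStepF_labeled adjd (L + 1) (u :: fr) layer
        rw [hX] at this
        exact this v hv
      · exact r1
      · exact r2
      · exact r3

-- roots initialisation: unconditional dict insert of 0 vs guarded set/list append
lemma init_corr :
    ∀ (roots : List Int) (layer : PySem.Dict Int Int) (q : List Int)
      (seen : PySem.Set Int) (order : List (Int × Int)),
      layer.items = order → seen = order.map Prod.fst → seen.Nodup →
      (∀ p ∈ order, p.2 = (0 : Int)) →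
      (roots.foldl (fun st r => (st.1.insert r 0, st.2 ++ [r])) (layer, q)).1.items
          = (roots.foldl (fun st r => if PySem.Set.contains st.1 r then st else (st.1.add r, st.2 ++ [(r, 0)])) (seen, order)).2
        ∧ (roots.foldl (fun st r => if PySem.Set.contains st.1 r then st else (st.1.add r, st.2 ++ [(r, 0)])) (seen, order)).1
          = (roots.foldl (fun st r => if PySem.Set.contains st.1 r then st else (st.1.add r, st.2 ++ [(r, 0)])) (seen, order)).2.map Prod.fst
        ∧ (roots.foldl (fun st r => if PySem.Set.contains st.1 r then st else (st.1.add r, st.2 ++ [(r, 0)])) (seen, order)).1.Nodup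
        ∧ (∀ p ∈ (roots.foldl (fun st r => if PySem.Set.contains st.1 r then st else (st.1.add r, st.2 ++ [(r, 0)])) (seen, order)).2, p.2 = (0 : Int))
        ∧ (roots.foldl (fun st r => (st.1.insert r 0, st.2 ++ [r])) (layer, q)).2 = q ++ roots := by
  intro roots
  induction roots with
  | nil => intro layer q seen order h1 h2 h3 h4; exact ⟨h1, h2, h3, h4, by simp⟩
  | cons r roots ih =>
    intro layer q seen order h1 h2 h3 h4
    simp only [List.foldl_cons]
    have hc : layer.contains r = PySem.Set.contains seen r := by
      rw [dict_set_contains, h1, h2]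
    by_cases h : PySem.Set.contains seen r
    · rw [if_pos h]
      have hcl : layer.contains r = true := by rw [hc]; simpa using h
      have hitems : (layer.insert r 0).items = order := by
        rw [PySem.Dict.items_insert_of_contains _ _ hcl, ← h1]
        conv_rhs => rw [← List.map_id layer.items]
        apply List.map_congr_left
        intro p hp
        by_cases hpr : p.1 == r
        · have : p = (r, (0 : Int)) := by
            have := h4 p (h1 ▸ hp)
            have hpe : p.1 = r := by simpa using hpr
            cases p; simp_all
          simp [this]
        · simp [hpr]
      have := ih (layer.insert r 0) (q ++ [r]) seen order hitems h2 h3 h4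
      refine ⟨this.1, this.2.1, this.2.2.1, this.2.2.2.1, ?_⟩
      rw [this.2.2.2.2]
      simp
    · rw [if_neg h]
      have hcl : layer.contains r = false := by rw [hc]; simpa using h
      have hsf : PySem.Set.contains seen r = false := by simpa using h
      have hitems : (layer.insert r 0).items = order ++ [(r, 0)] := by
        rw [PySem.Dict.items_insert_of_not_contains _ _ hcl, h1]
      have hmap : seen.add r = (order ++ [(r, 0)]).map Prod.fst := by
        have hm : r ∉ List.map Prod.fst order := h2 ▸ set_not_mem_of_contains_false hsf
        simp [PySem.Set.add, h2, hm]
      have hnd : (seen.add r).Nodup := PySem.Set.nodup_add seen r h3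
      have hz : ∀ p ∈ order ++ [(r, 0)], p.2 = (0 : Int) := by
        intro p hp
        rcases List.mem_append.mp hp with hp | hp
        · exact h4 p hp
        · simp at hp; simp [hp]
      have := ih (layer.insert r 0) (q ++ [r]) (seen.add r) (order ++ [(r, 0)]) hitems hmap hnd hz
      refine ⟨this.1, this.2.1, this.2.2.1, this.2.2.2.1, ?_⟩
      rw [this.2.2.2.2]
      simp

-- trailing pass: "layer[u] = 0 for unseen u in adj.keys" vs appending (u, 0) for unseen u
def pvRF (d : PySem.Dict Int Int) (tb : PySem.Set Int × List (Int × Int)) : Prop :=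
  d.items = tb.2 ∧ tb.1 = tb.2.map Prod.fst ∧ tb.1.Nodup

lemma final_step_corr (d : PySem.Dict Int Int) (tb : PySem.Set Int × List (Int × Int)) (u : Int)
    (h : pvRF d tb) :
    pvRF (if d.contains u then d else d.insert u 0)
      (if PySem.Set.contains tb.1 u then tb else (tb.1.add u, tb.2 ++ [(u, 0)])) := by
  obtain ⟨h1, h2, h3⟩ := h
  have hc : d.contains u = PySem.Set.contains tb.1 u := by
    rw [dict_set_contains, h1, h2]
  by_cases h : PySem.Set.contains tb.1 u
  · rw [hc, if_pos (by simpa using h), if_pos (by simpa using h)]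
    exact ⟨h1, h2, h3⟩
  · have hcf : d.contains u = false := by rw [hc]; simpa using h
    have hsf : PySem.Set.contains tb.1 u = false := by simpa using h
    rw [hc, hsf]
    simp only [Bool.false_eq_true, if_false]
    have hm : u ∉ List.map Prod.fst tb.2 := h2 ▸ set_not_mem_of_contains_false hsf
    refine ⟨?_, ?_, ?_⟩
    · rw [PySem.Dict.items_insert_of_not_contains _ _ hcf, h1]
    · simp [PySem.Set.add, h2, hm]
    · exact PySem.Set.nodup_add tb.1 u h3

lemma ofList_items_of_nodup (l : List (Int × Int)) (h : (l.map Prod.fst).Nodup) :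
    (PySem.Dict.ofList l).items = l := by
  have := PySem.Dict.items_foldl_insert_fresh l Prod.fst Prod.snd PySem.Dict.empty (by simp) h
  simpa [PySem.Dict.ofList, PySem.Dict.update] using this

-- roots all get label 0 in A's dict
lemma pvInit_inv :
    ∀ (roots : List Int) (st : PySem.Dict Int Int × List Int),
      (∀ u ∈ st.2, st.1.get? u = some 0) →
      ∀ u ∈ (roots.foldl (fun st r => (st.1.insert r 0, st.2 ++ [r])) st).2,
        ((roots.foldl (fun st r => (st.1.insert r 0, st.2 ++ [r])) st).1).get? u = some 0 := by
  intro roots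
  induction roots with
  | nil => intro st h u hu; exact h u hu
  | cons r roots ih =>
    intro st h u hu
    simp only [List.foldl_cons] at hu ⊢
    apply ih (st.1.insert r 0, st.2 ++ [r])
    · intro w hw
      simp only [List.mem_append, List.mem_singleton] at hw
      rcases hw with hw | rfl
      · have := h w hw
        by_cases hwr : w = r
        · subst hwr; exact PySem.Dict.get?_insert_self _ _ _
        · simp [PySem.Dict.get?_insert, hwr, this]
      · exact PySem.Dict.get?_insert_self _ _ _
    · exact hu

-- ===== VERDICT =====
theorem compute_layers_py_spec : Claim_equal_compute_layers_py := by
  intro adj roots _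
  unfold Spec_compute_layers_py
  simp only [compute_layers_py, compute_layers_py_alt]
  have hinit := init_corr roots PySem.Dict.empty [] PySem.Set.empty []
    (by rfl) (by rfl) (by simp [PySem.Set.empty]) (by intro p hp; cases hp)
  obtain ⟨i1, i2, i3, i4, i5⟩ := hinit
  simp only [List.nil_append] at i5
  have hlab : ∀ u ∈ (roots.foldl (fun st r => (st.1.insert r 0, st.2 ++ [r])) ((PySem.Dict.empty : PySem.Dict Int Int), ([] : List Int))).2,
      (roots.foldl (fun st r => (st.1.insert r 0, st.2 ++ [r])) ((PySem.Dict.empty : PySem.Dict Int Int), ([] : List Int))).1.get? u = some 0 :=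
    pvInit_inv roots _ (by intro u hu; cases hu)
  rw [i5] at hlab
  have hmain := pvMainAB (PySem.Dict.mk adj)
      (roots.length + 2 * pvPending (pvUniv (PySem.Dict.mk adj)) (roots.foldl (fun st r => (st.1.insert r 0, st.2 ++ [r])) ((PySem.Dict.empty : PySem.Dict Int Int), ([] : List Int))).1)
      (roots.foldl (fun st r => (st.1.insert r 0, st.2 ++ [r])) ((PySem.Dict.empty : PySem.Dict Int Int), ([] : List Int))).1
      (roots.foldl (fun st r => if PySem.Set.contains st.1 r then st else (st.1.add r, st.2 ++ [(r, 0)])) ((PySem.Set.empty : PySem.Set Int), ([] : List (Int × Int)))).1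
      (roots.foldl (fun st r => if PySem.Set.contains st.1 r then st else (st.1.add r, st.2 ++ [(r, 0)])) ((PySem.Set.empty : PySem.Set Int), ([] : List (Int × Int)))).2
      roots 0 (le_refl _) hlab i1 i2 i3
  obtain ⟨m1, m2, m3⟩ := hmain
  rw [i5]
  have hfin := foldl_rel pvRF
    (fun d u => if d.contains u then d else d.insert u 0)
    (fun st u => if PySem.Set.contains st.1 u then st else (st.1.add u, st.2 ++ [(u, 0)]))
    final_step_corr (PySem.Dict.mk adj).keys _ _ ⟨m1, m2, m3⟩
  obtain ⟨f1, f2, f3⟩ := hfin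
  rw [f1, ofList_items_of_nodup _ (f2 ▸ f3)]
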